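-- pv_equiv track=rewrite | github.com/yusong-offx/study | problem/programmers/연습문제/모의고사.py | solution
-- ===== SOURCE A (Python) =====
-- def solution(answers):
-- 	p1 = [1, 2, 3, 4, 5]
-- 	p2 = [2, 1, 2, 3, 2, 4, 2, 5]
-- 	p3 = [3, 3, 1, 1, 2, 2, 4, 4, 5, 5]
-- 	score = [0, 0, 0]
-- 	for i in range(len(answers)):
-- 		if p1[i%5] == answers[i]:
-- 			score[0] += 1
-- 		if p2[i%8] == answers[i]:
-- 			score[1] += 1
-- 		if p3[i%10] == answers[i]:
-- 			score[2] += 1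
-- 	answer = list()
-- 	max_score = max(score)
-- 	for i in range(3):
-- 		if score[i] == max_score:
-- 			answer.append(i+1)
-- 	return answer
-- ===== SOURCE B (Python) =====
-- def solution(answers):
--     patterns = [
--         [1, 2, 3, 4, 5],
--         [2, 1, 2, 3, 2, 4, 2, 5],
--         [3, 3, 1, 1, 2, 2, 4, 4, 5, 5],
--     ]
--     # The three patterns repeat with periods 5, 8, 10, all dividing 40.
--     # One pass builds a histogram keyed by (index mod 40, answer); each
--     # pattern's score is then read off with 40 constant-time lookups,
--     # never touching `answers` again.
--     hist = {}
--     for i, a in enumerate(answers):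
--         key = (i % 40, a)
--         hist[key] = hist.get(key, 0) + 1
--     scores = [sum(hist.get((r, p[r % len(p)]), 0) for r in range(40))
--               for p in patterns]
--     m = max(scores)
--     return [j + 1 for j, s in enumerate(scores) if s == m]
-- ===== Notes on version B (the rewrite author's own statement) =====
-- stated objective: alternative
-- what changed: Replaces A's answer-major loop that compares every answer against all three patterns with a single pass building a histogram keyed by (index mod 40, answer) — 40 being the common period of the three patterns — after which each pattern's score is read off with 40 constant-time lookups without revisiting the answers.
import Mathlib
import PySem

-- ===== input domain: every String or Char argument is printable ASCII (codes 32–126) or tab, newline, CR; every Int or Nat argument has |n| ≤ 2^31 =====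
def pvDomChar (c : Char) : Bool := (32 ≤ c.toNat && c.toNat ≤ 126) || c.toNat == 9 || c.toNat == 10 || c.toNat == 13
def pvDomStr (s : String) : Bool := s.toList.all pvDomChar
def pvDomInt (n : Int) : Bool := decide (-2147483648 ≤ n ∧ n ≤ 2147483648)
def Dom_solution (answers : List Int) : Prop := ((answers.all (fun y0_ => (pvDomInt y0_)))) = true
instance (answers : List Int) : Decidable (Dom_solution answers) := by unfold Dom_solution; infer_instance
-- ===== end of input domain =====

-- B replaces A's answer-major comparison loop with a one-pass histogram keyed by
-- (index mod 40, answer) and reads each pattern's score off with 40 lookups (objective: alternative).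

-- ===== PORT A =====
def solution (answers : List Int) : List Int :=
  let p1 : List Int := [1, 2, 3, 4, 5]
  let p2 : List Int := [2, 1, 2, 3, 2, 4, 2, 5]
  let p3 : List Int := [3, 3, 1, 1, 2, 2, 4, 4, 5, 5]
  let score :=
    (PySem.List.pyRange 0 (answers.length : Int) 1).foldl
      (fun (s : Int × Int × Int) i =>
        let a := PySem.List.pyGetD answers i 0
        let s0 := if PySem.List.pyGetD p1 (PySem.Int.mod i 5) 0 = a then s.1 + 1 else s.1
        let s1 := if PySem.List.pyGetD p2 (PySem.Int.mod i 8) 0 = a then s.2.1 + 1 else s.2.1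
        let s2 := if PySem.List.pyGetD p3 (PySem.Int.mod i 10) 0 = a then s.2.2 + 1 else s.2.2
        (s0, s1, s2)) (0, 0, 0)
  let scoreL : List Int := [score.1, score.2.1, score.2.2]
  let max_score := (PySem.List.max? scoreL (fun y => y)).getD 0
  (PySem.List.pyRange 0 3 1).foldl
    (fun (acc : List Int) i =>
      if PySem.List.pyGetD scoreL i 0 = max_score then acc ++ [i + 1] else acc) []

-- ===== PORT B =====
def solution_alt (answers : List Int) : List Int :=
  let patterns : List (List Int) :=
    [[1, 2, 3, 4, 5], [2, 1, 2, 3, 2, 4, 2, 5], [3, 3, 1, 1, 2, 2, 4, 4, 5, 5]]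
  let hist : PySem.Dict (Int × Int) Int :=
    (PySem.List.enumerate answers 0).foldl
      (fun d ia => d.modify (PySem.Int.mod ia.1 40, ia.2) 0 (· + 1)) PySem.Dict.empty
  let scores : List Int := patterns.map (fun p =>
    ((PySem.List.pyRange 0 40 1).map
      (fun r => hist.getD (r, PySem.List.pyGetD p (PySem.Int.mod r (p.length : Int)) 0) 0)).sum)
  let m := (PySem.List.max? scores (fun y => y)).getD 0
  (PySem.List.enumerate scores 0).foldl
    (fun (acc : List Int) js => if js.2 = m then acc ++ [js.1 + 1] else acc) []

-- ===== PRECONDITION & SPEC =====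
def Spec_solution (answers : List Int) (out : List Int) : Prop := out = solution_alt answers
instance (answers : List Int) (out : List Int) : Decidable (Spec_solution answers out) := by unfold Spec_solution; infer_instance

-- ===== CLAIM (what is proved, stated in full; the proofs are below) =====
def Claim_equal_solution : Prop := ∀ (answers : List Int), Dom_solution answers → Spec_solution answers (solution answers)

-- ===== LEMMAS AND PROOFS =====

/-- Summand of B's 40-residue scan at one index `j`: exactly the residue `c = j mod 40`
matches, and there it contributes 1 iff the pattern value at `c` equals `b`. -/
lemma sum_ite_pair (v : Int → Int) (c b : Int) (hc0 : 0 ≤ c) (hc40 : c < 40) :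
    ((PySem.List.pyRange 0 40 1).map (fun r => if (c, b) = (r, v r) then (1 : Int) else 0)).sum
      = if v c = b then 1 else 0 := by
  by_cases hb : v c = b
  · have hcong : ∀ r ∈ PySem.List.pyRange 0 40 1,
        (if (c, b) = (r, v r) then (1 : Int) else 0) = (if (fun r => r == c) r then 1 else 0) := by
      intro r _
      by_cases h : r = c
      · subst h; simp [hb]
      · have : ¬ (c, b) = (r, v r) := by
          simp only [Prod.ext_iff]; rintro ⟨h1, -⟩; exact h h1.symm
        simp [this, h]
    rw [List.map_congr_left hcong, PySem.List.sum_map_ite_one_zero]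
    have hmem : c ∈ PySem.List.pyRange 0 40 1 := (PySem.List.mem_pyRange_one).2 ⟨hc0, hc40⟩
    have h1 : List.count c (PySem.List.pyRange 0 40 1) = 1 :=
      List.count_eq_one_of_mem (PySem.List.nodup_pyRange_one 0 40) hmem
    simp only [List.count] at h1
    rw [h1]; simp [hb]
  · have hcong : ∀ r ∈ PySem.List.pyRange 0 40 1,
        (if (c, b) = (r, v r) then (1 : Int) else 0) = 0 := by
      intro r _
      have : ¬ (c, b) = (r, v r) := by
        simp only [Prod.ext_iff]
        rintro ⟨h1, h2⟩
        exact hb (h1 ▸ h2.symm)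
      simp [this]
    rw [List.map_congr_left hcong]
    simp [hb]

/-- B's residue-major sum of per-key counts equals the direct match count. -/
lemma sum_count_partition (l : List Int) (w v : Int → Int) :
    ((PySem.List.pyRange 0 40 1).map
        (fun r => (List.countP (fun j => decide ((PySem.Int.mod j 40, w j) = (r, v r))) l : Int))).sum
      = (List.countP (fun j => decide (v (PySem.Int.mod j 40) = w j)) l : Int) := by
  induction l with
  | nil => simp
  | cons x t ih =>
    have hsplit : ∀ r : Int,
        (List.countP (fun j => decide ((PySem.Int.mod j 40, w j) = (r, v r))) (x :: t) : Int)
          = (List.countP (fun j => decide ((PySem.Int.mod j 40, w j) = (r, v r))) t : Int)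
            + (if (PySem.Int.mod x 40, w x) = (r, v r) then (1 : Int) else 0) := by
      intro r
      rw [List.countP_cons]
      simp
    simp only [hsplit]
    rw [PySem.List.sum_map_add_int, ih,
        sum_ite_pair v (PySem.Int.mod x 40) (w x)
          (PySem.Int.mod_nonneg x (by norm_num)) (PySem.Int.mod_lt x (by norm_num))]
    rw [List.countP_cons]
    simp

/-- B's histogram lookup is the count of indices hashing to that key. -/
lemma hist_getD (answers : List Int) (key : Int × Int) :
    ((PySem.List.enumerate answers 0).foldl
        (fun d ia => d.modify (PySem.Int.mod ia.1 40, ia.2) 0 (· + 1)) PySem.Dict.empty).getD key 0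
      = (List.countP (fun j => decide ((PySem.Int.mod j 40, PySem.List.pyGetD answers j 0) = key))
          (PySem.List.pyRange 0 (answers.length : Int) 1) : Int) := by
  rw [PySem.List.enumerate_eq_map_pyRange answers 0, List.foldl_map]
  dsimp only
  rw [← List.foldl_map (f := fun j => (PySem.Int.mod j 40, PySem.List.pyGetD answers j 0))
        (g := fun (d : PySem.Dict (Int × Int) Int) x => d.modify x 0 (· + 1))]
  rw [PySem.Dict.getD_foldl_modify_add_one]
  simp only [List.count, List.countP_map, PySem.List.len, Function.comp_def]
  have h0 : (PySem.Dict.empty : PySem.Dict (Int × Int) Int).getD key 0 = 0 := rfl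
  rw [h0, zero_add]
  norm_cast
  apply List.countP_congr
  intro j _
  simp

/-- The pattern periods 5, 8, 10 all divide 40, so reducing mod 40 first is harmless. -/
lemma modmod (L : Int) (hL : 0 < L) (hd : L ∣ 40) (j : Int) :
    PySem.Int.mod (PySem.Int.mod j 40) L = PySem.Int.mod j L := by
  rw [PySem.Int.mod_eq_emod_of_pos hL, PySem.Int.mod_eq_emod_of_pos hL,
      PySem.Int.mod_eq_emod_of_pos (by norm_num : (0:Int) < 40)]
  exact Int.emod_emod_of_dvd j hd

/-- B's 40-lookup score of a pattern is the direct match count A computes. -/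
lemma pattern_score (answers p : List Int) (hL : 0 < (p.length : Int)) (hd : (p.length : Int) ∣ 40) :
    ((PySem.List.pyRange 0 40 1).map
        (fun r => ((PySem.List.enumerate answers 0).foldl
            (fun d ia => d.modify (PySem.Int.mod ia.1 40, ia.2) 0 (· + 1)) PySem.Dict.empty).getD
          (r, PySem.List.pyGetD p (PySem.Int.mod r (p.length : Int)) 0) 0)).sum
      = (List.countP
          (fun j => decide (PySem.List.pyGetD p (PySem.Int.mod j (p.length : Int)) 0
                              = PySem.List.pyGetD answers j 0))
          (PySem.List.pyRange 0 (answers.length : Int) 1) : Int) := by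
  simp only [hist_getD]
  rw [sum_count_partition (PySem.List.pyRange 0 (answers.length : Int) 1)
        (fun j => PySem.List.pyGetD answers j 0)
        (fun r => PySem.List.pyGetD p (PySem.Int.mod r (p.length : Int)) 0)]
  norm_cast
  apply List.countP_congr
  intro j _
  rw [modmod (p.length : Int) hL hd j]

/-- A fold maintaining a triple componentwise is the triple of the three folds. -/
lemma foldl_prod3 (l : List Int) (P1 P2 P3 : Int → Prop)
    [DecidablePred P1] [DecidablePred P2] [DecidablePred P3] (a b c : Int) :
    l.foldl (fun (s : Int × Int × Int) i =>
        (if P1 i then s.1 + 1 else s.1,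
         if P2 i then s.2.1 + 1 else s.2.1,
         if P3 i then s.2.2 + 1 else s.2.2)) (a, b, c)
      = (l.foldl (fun s i => if P1 i then s + 1 else s) a,
         l.foldl (fun s i => if P2 i then s + 1 else s) b,
         l.foldl (fun s i => if P3 i then s + 1 else s) c) := by
  induction l generalizing a b c with
  | nil => rfl
  | cons x t ih => simp only [List.foldl]; rw [ih]

/-- Both winner-collection loops over a 3-element score list produce the same list. -/
lemma final_eq (s1 s2 s3 m : Int) :
    (PySem.List.pyRange 0 3 1).foldl
      (fun (acc : List Int) i =>
        if PySem.List.pyGetD [s1, s2, s3] i 0 = m then acc ++ [i + 1] else acc) []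
    = (PySem.List.enumerate [s1, s2, s3] 0).foldl
      (fun (acc : List Int) is => if is.2 = m then acc ++ [is.1 + 1] else acc) [] := by
  rw [show PySem.List.pyRange 0 3 1 = [0, 1, 2] by decide]
  simp [PySem.List.enumerate, PySem.List.pyGetD, PySem.List.pyGet?, PySem.List.pyIdx?,
        List.foldl]

-- ===== VERDICT (by name: the statement is the Claim_ definition above) =====
theorem solution_spec : Claim_equal_solution := by
  unfold Claim_equal_solution
  intro answers _
  unfold Spec_solution solution solution_alt
  simp only [List.map]
  rw [foldl_prod3]
  simp only [PySem.List.foldl_ite_add_one, zero_add]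
  simp only [pattern_score answers [1, 2, 3, 4, 5] (by norm_num) (by norm_num),
      pattern_score answers [2, 1, 2, 3, 2, 4, 2, 5] (by norm_num) (by norm_num),
      pattern_score answers [3, 3, 1, 1, 2, 2, 4, 4, 5, 5] (by norm_num) (by norm_num)]
  norm_num
  exact final_eq _ _ _ _
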